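-- pv_equiv track=rewrite | github.com/LSe-Yeong/Backjoon | python/재귀/P17829.py | polling
-- ===== SOURCE A (Python) =====
-- import heapq
--
-- def polling(array):
--     N = len(array)
--     if(N==1):
--         return array
--     new_array=[[0 for _ in range(N//2)] for i in range(N//2)]
--     queue=[]
--     r_idx=0
--     c_idx=0
--     for r in range(0,N,2):
--         for c in range(0,N,2):
--             for row in range(r,r+2):
--                 for col in range(c,c+2):
--                     heapq.heappush(queue,-array[row][col])
--             heapq.heappop(queue)
--             new_array[r_idx][c_idx]=-heapq.heappop(queue)
--             c_idx+=1
--         r_idx+=1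
--         c_idx=0
--     result = polling(new_array)
--     return result
-- ===== SOURCE B (Python) =====
-- def polling(array):
--     # Iterative level-by-level reduction; the shared pool of not-yet-taken values is
--     # kept as an ascending sorted list (hand-rolled binary-search insert, pop the two
--     # largest from the end) instead of heapq's negated min-heap driven by recursion.
--     while len(array) > 1:
--         n = len(array) // 2
--         pool = []
--         out = []
--         for r in range(n):
--             row = []
--             for c in range(n):
--                 for v in (array[2*r][2*c], array[2*r][2*c+1],
--                           array[2*r+1][2*c], array[2*r+1][2*c+1]):
--                     lo = 0
--                     hi = len(pool)
--                     while lo < hi: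
--                         mid = (lo + hi) // 2
--                         if v < pool[mid]:
--                             hi = mid
--                         else:
--                             lo = mid + 1
--                     pool.insert(lo, v)
--                 pool.pop()
--                 row.append(pool.pop())
--             out.append(row)
--         array = out
--     return array
-- ===== Notes on version B (the rewrite author's own statement) =====
-- stated objective: alternative
-- what changed: A's tail recursion becomes an iterative while-loop over levels, heapq's shared negated min-heap becomes an ascending sorted list maintained with a hand-rolled binary-search insert (popping the two largest from the end), and rows are appended to a growing output instead of assigned into a preallocated zero matrix via r_idx/c_idx counters.
-- outside the precondition, e.g. on polling([]): A raises RecursionError, B returns []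
import Mathlib
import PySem

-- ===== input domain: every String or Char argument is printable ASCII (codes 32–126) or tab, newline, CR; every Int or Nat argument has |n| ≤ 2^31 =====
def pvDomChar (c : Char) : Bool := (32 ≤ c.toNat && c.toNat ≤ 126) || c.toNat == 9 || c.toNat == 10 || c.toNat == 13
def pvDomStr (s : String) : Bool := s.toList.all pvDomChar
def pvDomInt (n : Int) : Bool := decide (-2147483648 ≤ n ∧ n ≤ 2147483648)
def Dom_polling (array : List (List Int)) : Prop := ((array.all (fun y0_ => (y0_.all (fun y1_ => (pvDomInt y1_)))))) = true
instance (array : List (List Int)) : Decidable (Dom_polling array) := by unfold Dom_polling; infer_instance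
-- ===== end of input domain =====

-- B replaces A's recursion by an iterative level loop and heapq's negated min-heap by an
-- ascending sorted list kept with a hand-rolled binary-search insert (alternative, not faster).

-- ===== PORT A =====
-- heapq on Int elements, modeled by the heap's ascending sorted ordering: heappush inserts,
-- heappop returns the minimum — exact for Int contents (equal Ints are indistinguishable,
-- so only the multiset and the min matter, never the heap's internal layout).
def hpush (queue : List Int) (x : Int) : List Int := List.orderedInsert (· ≤ ·) x queue

-- heappop; the [] case is Python's IndexError, unreachable here (every pop is preceded by
-- four pushes and each block pops only two).
def hpop : List Int → Int × List Int
  | [] => (0, [])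
  | a :: t => (a, t)

-- body of A's 'for c in range(0,N,2)' loop; the two 2-iteration loops 'for row in
-- range(r,r+2): for col in range(c,c+2)' are unrolled in Python's push order.
-- state = (new_array, queue, r_idx, c_idx); indices in range under Pre_ (A raises otherwise).
def pollingBlock (array : List (List Int)) (r : Int)
    (t : List (List Int) × List Int × Nat × Nat) (c : Int) :
    List (List Int) × List Int × Nat × Nat :=
  let q := hpush t.2.1 (-(PySem.List.pyGetD (PySem.List.pyGetD array r []) c 0))
  let q := hpush q (-(PySem.List.pyGetD (PySem.List.pyGetD array r []) (c+1) 0))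
  let q := hpush q (-(PySem.List.pyGetD (PySem.List.pyGetD array (r+1) []) c 0))
  let q := hpush q (-(PySem.List.pyGetD (PySem.List.pyGetD array (r+1) []) (c+1) 0))
  let (_, q) := hpop q
  let (v, q) := hpop q
  (t.1.set t.2.2.1 ((t.1.getD t.2.2.1 []).set t.2.2.2 (-v)), q, t.2.2.1, t.2.2.2 + 1)

-- body of A's 'for r in range(0,N,2)' loop: run the inner loop, then r_idx += 1; c_idx = 0
def pollingRow (array : List (List Int)) (N : Int)
    (s : List (List Int) × List Int × Nat × Nat) (r : Int) :
    List (List Int) × List Int × Nat × Nat :=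
  let t := (PySem.List.pyRange 0 N 2).foldl (pollingBlock array r) s
  (t.1, t.2.1, t.2.2.1 + 1, 0)

-- one recursion level of A: new_array preallocated as (N//2)×(N//2) zeros, queue = []
def pollingLevel (array : List (List Int)) : List (List Int) :=
  let N := array.length
  ((PySem.List.pyRange 0 (N : Int) 2).foldl (pollingRow array (N : Int))
    (List.replicate (N / 2) (List.replicate (N / 2) (0 : Int)), ([] : List Int), 0, 0)).1

-- A's tail recursion, totalized by fuel; fuel runs out only for N = 0, where the Python
-- recurses forever (RecursionError) — excluded by Pre_.
def pollingFuel : Nat → List (List Int) → List (List Int)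
  | 0, array => array
  | fuel+1, array => if array.length = 1 then array else pollingFuel fuel (pollingLevel array)

def polling (array : List (List Int)) : List (List Int) :=
  pollingFuel (array.length + 1) array

-- ===== PORT B =====
-- Source B's 'while lo < hi' binary-search loop, totalized by fuel (called with fuel = len(pool),
-- an upper bound on hi - lo, so the fuel never runs out); mid is in range whenever tested.
def bins : Nat → List Int → Int → Nat → Nat → Nat
  | 0, _, _, lo, _ => lo
  | fuel+1, pool, v, lo, hi =>
    if lo < hi then
      let mid := (lo + hi) / 2
      if v < PySem.List.pyGetD pool (mid : Int) 0 then bins fuel pool v lo mid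
      else bins fuel pool v (mid + 1) hi
    else lo

-- the binary search followed by Source B's 'pool.insert(lo, v)'
def insSorted (pool : List Int) (v : Int) : List Int :=
  PySem.List.insert pool ((bins pool.length pool v 0 pool.length : Nat) : Int) v

-- Source B's 'pool.pop()' (last element); [] would be Python's IndexError, unreachable
-- (the pool holds at least four elements when the two pops run).
def popLast (pool : List Int) : Int × List Int := (pool.getLastD 0, pool.dropLast)

-- body of B's 'for c in range(n)' loop: the 'for v in (...)' tuple loop unrolled in order
def pollingBlockAlt (array : List (List Int)) (r : Int)
    (t : List Int × List Int) (c : Int) : List Int × List Int :=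
  let p := insSorted t.2 (PySem.List.pyGetD (PySem.List.pyGetD array (2*r) []) (2*c) 0)
  let p := insSorted p (PySem.List.pyGetD (PySem.List.pyGetD array (2*r) []) (2*c+1) 0)
  let p := insSorted p (PySem.List.pyGetD (PySem.List.pyGetD array (2*r+1) []) (2*c) 0)
  let p := insSorted p (PySem.List.pyGetD (PySem.List.pyGetD array (2*r+1) []) (2*c+1) 0)
  let (_, p) := popLast p
  let (v, p) := popLast p
  (t.1 ++ [v], p)

-- body of B's 'for r in range(n)' loop: build one row, append it to out
def pollingRowAlt (array : List (List Int)) (n : Int)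
    (s : List (List Int) × List Int) (r : Int) : List (List Int) × List Int :=
  let t := (PySem.List.pyRange 0 n 1).foldl (pollingBlockAlt array r) ([], s.2)
  (s.1 ++ [t.1], t.2)

-- one iteration of B's while loop: pool = [], out = []
def pollingLevelAlt (array : List (List Int)) : List (List Int) :=
  let n := array.length / 2
  ((PySem.List.pyRange 0 (n : Int) 1).foldl (pollingRowAlt array (n : Int)) ([], [])).1

-- B's 'while len(array) > 1' loop, totalized by fuel; each iteration at least halves the
-- length, so fuel = len + 1 is never exhausted and the port equals Source B on every input.
def pollingAltFuel : Nat → List (List Int) → List (List Int)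
  | 0, array => array
  | fuel+1, array =>
      if 1 < array.length then pollingAltFuel fuel (pollingLevelAlt array) else array

def polling_alt (array : List (List Int)) : List (List Int) :=
  pollingAltFuel (array.length + 1) array

-- ===== PRECONDITION & SPEC =====
-- Pre_ = exactly the inputs where the Python A returns: a power-of-two number of rows and
-- (unless 1×…) every row at least as long as the number of rows; otherwise A's recursion
-- reaches an empty or odd-sized level or a too-short row and raises (RecursionError on [],
-- IndexError otherwise).
def Pre_polling (array : List (List Int)) : Prop :=
  array.length = 2 ^ Nat.log2 array.length ∧
    (array.length = 1 ∨ ∀ row ∈ array, array.length ≤ row.length)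
instance (array : List (List Int)) : Decidable (Pre_polling array) := by
  unfold Pre_polling; infer_instance

def pvWitness_polling : List (List Int) := [[1, 2], [3, 4]]

def Spec_polling (array : List (List Int)) (out : List (List Int)) : Prop :=
  out = polling_alt array
instance (array : List (List Int)) (out : List (List Int)) : Decidable (Spec_polling array out) := by
  unfold Spec_polling; infer_instance

-- ===== CLAIM (what is proved, stated in full; the proofs are below) =====
def Claim_equal_polling : Prop :=
  ∀ (array : List (List Int)), Dom_polling array → Pre_polling array →
    Spec_polling array (polling array)

-- ===== LEMMAS AND PROOFS =====

lemma eq_of_perm_sorted {l1 l2 : List Int} (hp : l1.Perm l2)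
    (h1 : List.Pairwise (· ≤ ·) l1) (h2 : List.Pairwise (· ≤ ·) l2) : l1 = l2 :=
  hp.eq_of_pairwise (fun _ _ _ _ hab hba => le_antisymm hab hba) h1 h2

-- ascending order is preserved by negate-and-reverse
lemma sorted_revneg {q : List Int} (h : List.Pairwise (· ≤ ·) q) :
    List.Pairwise (· ≤ ·) ((q.map (fun t : Int => -t)).reverse) := by
  rw [List.pairwise_reverse]
  exact (h.map (fun t : Int => -t) (fun hab => by dsimp; omega))

lemma sorted_getD_mono {pool : List Int} (hs : List.Pairwise (· ≤ ·) pool)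
    {i j : Nat} (hij : i ≤ j) (hj : j < pool.length) :
    pool.getD i 0 ≤ pool.getD j 0 := by
  rw [List.getD_eq_getElem _ _ (by omega), List.getD_eq_getElem _ _ hj]
  rcases Nat.lt_or_eq_of_le hij with h | h
  · exact List.pairwise_iff_getElem.mp hs i j (by omega) hj h
  · subst h; rfl

-- the binary-search loop finds a boundary position: everything before it is ≤ v,
-- everything from it on is > v
lemma bins_spec (pool : List Int) (v : Int) (hs : List.Pairwise (· ≤ ·) pool) :
    ∀ fuel lo hi, hi - lo ≤ fuel → lo ≤ hi → hi ≤ pool.length →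
    (∀ i, i < lo → pool.getD i 0 ≤ v) →
    (∀ i, hi ≤ i → i < pool.length → v < pool.getD i 0) →
    lo ≤ bins fuel pool v lo hi ∧ bins fuel pool v lo hi ≤ hi ∧
    (∀ i, i < bins fuel pool v lo hi → pool.getD i 0 ≤ v) ∧
    (∀ i, bins fuel pool v lo hi ≤ i → i < pool.length → v < pool.getD i 0) := by
  intro fuel
  induction fuel with
  | zero =>
    intro lo hi hf hlh hhl hlow hhigh
    have : lo = hi := by omega
    subst this
    exact ⟨le_rfl, le_rfl, hlow, hhigh⟩
  | succ fuel ih =>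
    intro lo hi hf hlh hhl hlow hhigh
    by_cases h : lo < hi
    · have hmid : (lo + hi) / 2 < pool.length := by omega
      have hgd : PySem.List.pyGetD pool (((lo + hi) / 2 : Nat) : Int) 0
          = pool.getD ((lo + hi) / 2) 0 := PySem.List.pyGetD_natCast ..
      rw [show bins (fuel+1) pool v lo hi
          = if lo < hi then
              (if v < PySem.List.pyGetD pool (((lo + hi) / 2 : Nat) : Int) 0
               then bins fuel pool v lo ((lo + hi) / 2)
               else bins fuel pool v ((lo + hi) / 2 + 1) hi)
            else lo from rfl, if_pos h]
      by_cases hv : v < PySem.List.pyGetD pool (((lo + hi) / 2 : Nat) : Int) 0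
      · rw [if_pos hv]
        rw [hgd] at hv
        have := ih lo ((lo + hi) / 2) (by omega) (by omega) (by omega) hlow
          (fun i hi1 hi2 => lt_of_lt_of_le hv (sorted_getD_mono hs hi1 hi2))
        exact ⟨this.1, by omega, this.2.2.1, this.2.2.2⟩
      · rw [if_neg hv]
        rw [hgd] at hv
        simp only [not_lt] at hv
        have := ih ((lo + hi) / 2 + 1) hi (by omega) (by omega) hhl
          (fun i hi1 => le_trans (sorted_getD_mono hs (by omega) hmid) hv) hhigh
        exact ⟨by omega, this.2.1, this.2.2.1, this.2.2.2⟩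
    · have : lo = hi := by omega
      subst this
      simp only [bins, if_neg h]
      exact ⟨le_rfl, le_rfl, hlow, hhigh⟩

-- B's binary-search insert equals ordered insertion into the sorted pool
lemma insSorted_eq (pool : List Int) (v : Int) (hs : List.Pairwise (· ≤ ·) pool) :
    insSorted pool v = List.orderedInsert (· ≤ ·) v pool := by
  obtain ⟨h1, h2, h3, h4⟩ := bins_spec pool v hs pool.length 0 pool.length (by omega) (by omega)
    le_rfl (by omega) (by omega)
  set r := bins pool.length pool v 0 pool.length with hr
  rw [insSorted, ← hr, PySem.List.insert_natCast _ _ _ h2]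
  apply eq_of_perm_sorted
  · have p1 : (List.take r pool ++ v :: List.drop r pool).Perm (v :: pool) := by
      have := @List.perm_middle _ v (List.take r pool) (List.drop r pool)
      rwa [List.take_append_drop] at this
    exact p1.trans (List.perm_orderedInsert _ v pool).symm
  · rw [List.pairwise_append]
    refine ⟨List.Pairwise.sublist (List.take_sublist _ _) hs, ?_, ?_⟩
    · rw [List.pairwise_cons]
      refine ⟨?_, List.Pairwise.sublist (List.drop_sublist _ _) hs⟩
      intro y hy
      obtain ⟨k, hk, rfl⟩ := List.mem_iff_getElem.mp hy
      rw [List.getElem_drop]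
      have hlen : r + k < pool.length := by
        have := hk; rw [List.length_drop] at this; omega
      have := h4 (r + k) (by omega) hlen
      rw [List.getD_eq_getElem _ _ hlen] at this
      omega
    · intro a ha b hb
      obtain ⟨k, hk, rfl⟩ := List.mem_iff_getElem.mp ha
      rw [List.getElem_take]
      have hkr : k < r := by
        have := hk; rw [List.length_take] at this; omega
      have hklen : k < pool.length := by omega
      have hav : pool[k] ≤ v := by
        have := h3 k hkr; rwa [List.getD_eq_getElem _ _ hklen] at this
      rcases List.mem_cons.mp hb with rfl | hb
      · exact hav
      · obtain ⟨m, hm, rfl⟩ := List.mem_iff_getElem.mp hb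
        rw [List.getElem_drop]
        have hmlen : r + m < pool.length := by
          have := hm; rw [List.length_drop] at this; omega
        have := h4 (r + m) (by omega) hmlen
        rw [List.getD_eq_getElem _ _ hmlen] at this
        omega
  · exact List.Pairwise.orderedInsert v pool hs

lemma revneg_orderedInsert (q : List Int) (x : Int) (hq : List.Pairwise (· ≤ ·) q) :
    ((List.orderedInsert (· ≤ ·) x q).map (fun t : Int => -t)).reverse
      = List.orderedInsert (· ≤ ·) (-x) ((q.map (fun t : Int => -t)).reverse) := by
  apply eq_of_perm_sorted
  · have p1 : ((List.orderedInsert (· ≤ ·) x q).map (fun t : Int => -t)).reverse.Perm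
        ((x :: q).map (fun t : Int => -t)) :=
      (List.reverse_perm _).trans ((List.perm_orderedInsert _ x q).map _)
    have p2 : ((x :: q).map (fun t : Int => -t)).Perm
        (-x :: (q.map (fun t : Int => -t)).reverse) :=
      List.Perm.cons _ (List.reverse_perm _).symm
    exact (p1.trans p2).trans (List.perm_orderedInsert _ _ _).symm
  · exact sorted_revneg (List.Pairwise.orderedInsert x q hq)
  · exact List.Pairwise.orderedInsert _ _ (sorted_revneg hq)

-- one push on A's (negated) heap corresponds to one binary-search insert on B's pool
lemma push_bridge (q : List Int) (v : Int) (hq : List.Pairwise (· ≤ ·) q) :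
    insSorted ((q.map (fun t : Int => -t)).reverse) v
        = ((hpush q (-v)).map (fun t : Int => -t)).reverse ∧
      List.Pairwise (· ≤ ·) (hpush q (-v)) := by
  constructor
  · rw [insSorted_eq _ _ (sorted_revneg hq), hpush, revneg_orderedInsert q (-v) hq, neg_neg]
  · exact List.Pairwise.orderedInsert _ _ hq

lemma getD_append_len {α : Type} (top : List α) (x : α) (bot : List α) (d : α) :
    (top ++ x :: bot).getD top.length d = x := by
  induction top with
  | nil => rfl
  | cons a t ih => simp [ih]

lemma set_append_len {α : Type} (top : List α) (x y : α) (bot : List α) :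
    (top ++ x :: bot).set top.length y = top ++ y :: bot := by
  induction top with
  | nil => rfl
  | cons a t ih => simp [ih]

-- one 2×2 block: A's four pushes and two pops against B's four inserts and two end-pops
lemma block_bridge (array : List (List Int)) (i j : Nat) (q : List Int)
    (hq : List.Pairwise (· ≤ ·) q) (na : List (List Int)) (ri ci : Nat) (row : List Int) :
    ∃ v q', List.Pairwise (· ≤ ·) q' ∧
      pollingBlock array ((2*i : Nat) : Int) (na, q, ri, ci) ((2*j : Nat) : Int)
        = (na.set ri ((na.getD ri []).set ci v), q', ri, ci + 1) ∧
      pollingBlockAlt array ((i : Nat) : Int) (row, (q.map (fun t : Int => -t)).reverse) ((j : Nat) : Int)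
        = (row ++ [v], (q'.map (fun t : Int => -t)).reverse) := by
  have e1 : 2 * ((i : Nat) : Int) = ((2*i : Nat) : Int) := by push_cast; ring
  have e2 : 2 * ((j : Nat) : Int) = ((2*j : Nat) : Int) := by push_cast; ring
  set a1 := PySem.List.pyGetD (PySem.List.pyGetD array ((2*i : Nat) : Int) []) ((2*j : Nat) : Int) 0 with ha1
  set a2 := PySem.List.pyGetD (PySem.List.pyGetD array ((2*i : Nat) : Int) []) (((2*j : Nat) : Int) + 1) 0 with ha2
  set a3 := PySem.List.pyGetD (PySem.List.pyGetD array (((2*i : Nat) : Int) + 1) []) ((2*j : Nat) : Int) 0 with ha3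
  set a4 := PySem.List.pyGetD (PySem.List.pyGetD array (((2*i : Nat) : Int) + 1) []) (((2*j : Nat) : Int) + 1) 0 with ha4
  have h1 : List.Pairwise (· ≤ ·) (hpush q (-a1)) := (push_bridge q a1 hq).2
  have h2 : List.Pairwise (· ≤ ·) (hpush (hpush q (-a1)) (-a2)) := (push_bridge _ a2 h1).2
  have h3 : List.Pairwise (· ≤ ·) (hpush (hpush (hpush q (-a1)) (-a2)) (-a3)) :=
    (push_bridge _ a3 h2).2
  have h4 : List.Pairwise (· ≤ ·) (hpush (hpush (hpush (hpush q (-a1)) (-a2)) (-a3)) (-a4)) :=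
    (push_bridge _ a4 h3).2
  have hlen : (hpush (hpush (hpush (hpush q (-a1)) (-a2)) (-a3)) (-a4)).length = q.length + 4 := by
    simp [hpush, List.orderedInsert_length]
  obtain ⟨x, y, t, hsplit⟩ :
      ∃ x y t, hpush (hpush (hpush (hpush q (-a1)) (-a2)) (-a3)) (-a4) = x :: y :: t := by
    rcases hL : hpush (hpush (hpush (hpush q (-a1)) (-a2)) (-a3)) (-a4) with _ | ⟨x, _ | ⟨y, t⟩⟩
    · rw [hL] at hlen; simp at hlen
    · rw [hL] at hlen; simp at hlen
    · exact ⟨x, y, t, rfl⟩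
  have hts : List.Pairwise (· ≤ ·) t := by
    rw [hsplit] at h4
    exact ((List.pairwise_cons.mp ((List.pairwise_cons.mp h4).2)).2)
  refine ⟨-y, t, hts, ?_, ?_⟩
  · simp only [pollingBlock, ← ha1, ← ha2, ← ha3, ← ha4, hsplit, hpop]
  · have b1 := (push_bridge q a1 hq).1
    have b2 := (push_bridge _ a2 h1).1
    have b3 := (push_bridge _ a3 h2).1
    have b4 := (push_bridge _ a4 h3).1
    simp only [pollingBlockAlt, e1, e2, ← ha1, ← ha2, ← ha3, ← ha4, b1, b2, b3, b4, hsplit]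
    simp only [List.map_cons, List.reverse_cons, List.append_assoc, List.singleton_append]
    rw [show ((t.map (fun t : Int => -t)).reverse ++ [-y, -x] : List Int)
        = ((t.map (fun t : Int => -t)).reverse ++ [-y]) ++ [-x] by simp]
    simp only [popLast, List.getLastD_concat, List.dropLast_concat]

-- one row of blocks
lemma inner_bridge (array : List (List Int)) (i : Nat) :
    ∀ (ks : List Nat) (q : List Int), List.Pairwise (· ≤ ·) q →
    ∀ (top bot : List (List Int)) (row : List Int),
    ∃ (row' q' : List Int), List.Pairwise (· ≤ ·) q' ∧
      (ks.map (fun t => ((2*t : Nat) : Int))).foldl (pollingBlock array ((2*i : Nat) : Int))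
          (top ++ (row ++ List.replicate ks.length (0 : Int)) :: bot, q, top.length, row.length)
        = (top ++ row' :: bot, q', top.length, row.length + ks.length) ∧
      (ks.map (fun t => ((t : Nat) : Int))).foldl (pollingBlockAlt array ((i : Nat) : Int))
          (row, (q.map (fun t : Int => -t)).reverse)
        = (row', (q'.map (fun t : Int => -t)).reverse) := by
  intro ks
  induction ks with
  | nil =>
    intro q hq top bot row
    exact ⟨row, q, hq, by simp, by simp⟩
  | cons k ks ih =>
    intro q hq top bot row
    obtain ⟨v, q1, hq1, hA, hB⟩ := block_bridge array i k q hq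
      (top ++ (row ++ List.replicate (ks.length + 1) (0 : Int)) :: bot) top.length row.length row
    obtain ⟨row', q', hq', hA', hB'⟩ := ih q1 hq1 top bot (row ++ [v])
    refine ⟨row', q', hq', ?_, ?_⟩
    · have hset : ((top ++ (row ++ List.replicate (ks.length + 1) (0 : Int)) :: bot).set
          top.length ((top ++ (row ++ List.replicate (ks.length + 1) (0 : Int)) :: bot).getD
            top.length [] |>.set row.length v))
          = top ++ ((row ++ [v]) ++ List.replicate ks.length (0 : Int)) :: bot := by
        rw [getD_append_len, List.replicate_succ, set_append_len row, set_append_len]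
        simp
      rw [List.map_cons, List.foldl_cons, List.length_cons, hA, hset]
      have harith : row.length + 1 = (row ++ [v]).length := by simp
      rw [show row.length + (ks.length + 1) = (row ++ [v]).length + ks.length by simp; omega,
        harith, hA']
    · rw [List.map_cons, List.foldl_cons, hB, hB']

lemma pyRange_two (n : Nat) :
    PySem.List.pyRange 0 (2 * (n : Int)) 2 = (List.range n).map (fun t => ((2*t : Nat) : Int)) := by
  rw [PySem.List.pyRange_of_pos _ _ (by norm_num)]
  rcases Nat.eq_zero_or_pos n with h | h
  · subst h; simp
  · have h1 : (0:Int) < 2 * n := by positivity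
    rw [if_pos h1]
    have h2 : ((2 * (n:Int) - 0 + 2 - 1) / 2).toNat = n := by omega
    rw [h2]
    apply List.map_congr_left
    intro k _
    push_cast
    ring

lemma pyRange_nat (n : Nat) :
    PySem.List.pyRange 0 ((n : Nat) : Int) 1 = (List.range n).map (fun t => ((t : Nat) : Int)) := by
  rw [PySem.List.pyRange_one]
  simp

-- all rows of one level
lemma outer_bridge (array : List (List Int)) (n : Nat) (hn : array.length = 2 * n) :
    ∀ (is : List Nat) (q : List Int), List.Pairwise (· ≤ ·) q →
    ∀ (done : List (List Int)),
    ∃ (rows' : List (List Int)) (q' : List Int), rows'.length = is.length ∧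
      (is.map (fun t => ((2*t : Nat) : Int))).foldl (pollingRow array ((array.length : Nat) : Int))
          (done ++ List.replicate is.length (List.replicate n (0 : Int)), q, done.length, 0)
        = (done ++ rows', q', done.length + is.length, 0) ∧
      (is.map (fun t => ((t : Nat) : Int))).foldl (pollingRowAlt array ((n : Nat) : Int))
          (done, (q.map (fun t : Int => -t)).reverse)
        = (done ++ rows', (q'.map (fun t : Int => -t)).reverse) := by
  have hpyA : PySem.List.pyRange 0 ((array.length : Nat) : Int) 2
      = (List.range n).map (fun t => ((2*t : Nat) : Int)) := by
    rw [hn]; push_cast; exact pyRange_two n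
  intro is
  induction is with
  | nil =>
    intro q hq done
    exact ⟨[], q, rfl, by simp, by simp⟩
  | cons i0 is ih =>
    intro q hq done
    obtain ⟨row', q1, hq1, hA, hB⟩ := inner_bridge array i0 (List.range n) q hq done
      (List.replicate is.length (List.replicate n (0 : Int))) []
    obtain ⟨rows', q', hlen', hA', hB'⟩ := ih q1 hq1 (done ++ [row'])
    refine ⟨row' :: rows', q', by simp [hlen'], ?_, ?_⟩
    · rw [List.map_cons, List.foldl_cons]
      have hR : pollingRow array ((array.length : Nat) : Int)
          (done ++ List.replicate (i0 :: is).length (List.replicate n (0 : Int)), q,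
            done.length, 0) ((2*i0 : Nat) : Int)
          = (done ++ row' :: List.replicate is.length (List.replicate n (0 : Int)), q1,
            done.length + 1, 0) := by
        simp only [pollingRow, hpyA, List.length_cons, List.replicate_succ]
        rw [show (done ++ (List.replicate n (0 : Int)) ::
              List.replicate is.length (List.replicate n (0 : Int)), q, done.length, (0 : Nat))
            = (done ++ (([] : List Int) ++ List.replicate (List.range n).length (0 : Int)) ::
              List.replicate is.length (List.replicate n (0 : Int)), q,
              done.length, ([] : List Int).length) by simp]
        rw [hA]
      rw [hR]
      have hinit : (done ++ row' :: List.replicate is.length (List.replicate n (0 : Int)), q1,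
            done.length + 1, (0 : Nat))
          = ((done ++ [row']) ++ List.replicate is.length (List.replicate n (0 : Int)), q1,
            (done ++ [row']).length, (0 : Nat)) := by simp
      rw [hinit, hA']
      simp [Nat.add_assoc]
      omega
    · rw [List.map_cons, List.foldl_cons]
      have hR : pollingRowAlt array ((n : Nat) : Int)
          (done, (q.map (fun t : Int => -t)).reverse) ((i0 : Nat) : Int)
          = (done ++ [row'], (q1.map (fun t : Int => -t)).reverse) := by
        simp only [pollingRowAlt, pyRange_nat, hB]
      rw [hR, hB']
      simp

lemma level_bridge (array : List (List Int)) (n : Nat) (hn : array.length = 2 * n) :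
    pollingLevel array = pollingLevelAlt array ∧ (pollingLevel array).length = n := by
  have hpyA : PySem.List.pyRange 0 ((array.length : Nat) : Int) 2
      = (List.range n).map (fun t => ((2*t : Nat) : Int)) := by
    rw [hn]; push_cast; exact pyRange_two n
  have hn2 : array.length / 2 = n := by omega
  obtain ⟨rows', q', hlen', hA, hB⟩ := outer_bridge array n hn (List.range n) [] .nil []
  have hAres : pollingLevel array = rows' := by
    simp only [pollingLevel, hpyA, hn2]
    rw [show (List.replicate n (List.replicate n (0 : Int)), ([] : List Int), (0 : Nat), (0 : Nat))
        = (([] : List (List Int)) ++ List.replicate (List.range n).length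
            (List.replicate n (0 : Int)), ([] : List Int),
          ([] : List (List Int)).length, (0 : Nat)) by simp]
    rw [hA]
    simp
  have hBres : pollingLevelAlt array = rows' := by
    simp only [pollingLevelAlt, hn2, pyRange_nat]
    rw [show (([] : List (List Int)), ([] : List Int))
        = (([] : List (List Int)), ((([] : List Int)).map (fun t : Int => -t)).reverse) by simp]
    rw [hB]
    simp
  refine ⟨by rw [hAres, hBres], by rw [hAres, hlen']; simp⟩

lemma fuel_bridge :
    ∀ len : Nat, len = 2 ^ Nat.log2 len →
    ∀ (array : List (List Int)) (fA fB : Nat), array.length = len →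
      len ≤ fA → len ≤ fB → pollingFuel fA array = pollingAltFuel fB array := by
  intro len
  induction len using Nat.strong_induction_on with
  | _ len ih =>
    intro hpow array fA fB hlen hfA hfB
    have hpos : 1 ≤ len := by rw [hpow]; exact Nat.one_le_two_pow
    rcases fA with _ | a
    · omega
    rcases fB with _ | b
    · omega
    by_cases h1 : len = 1
    · simp only [pollingFuel, pollingAltFuel]
      rw [if_pos (by omega : array.length = 1), if_neg (by omega : ¬ 1 < array.length)]
    · have hk : 1 ≤ Nat.log2 len := by
        by_contra hc
        rw [hpow, Nat.le_zero.mp (by omega : Nat.log2 len ≤ 0)] at h1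
        exact h1 rfl
      obtain ⟨k, hkk⟩ : ∃ k, Nat.log2 len = k + 1 := ⟨Nat.log2 len - 1, by omega⟩
      have hlen2 : len = 2 * 2 ^ (Nat.log2 len - 1) := by
        conv_lhs => rw [hpow]
        rw [hkk, Nat.add_sub_cancel, pow_succ]
        ring
      have hnpow : 2 ^ (Nat.log2 len - 1)
          = 2 ^ Nat.log2 (2 ^ (Nat.log2 len - 1)) := by rw [Nat.log2_two_pow]
      have hnpos : 1 ≤ 2 ^ (Nat.log2 len - 1) := Nat.one_le_two_pow
      obtain ⟨hLeq, hLlen⟩ := level_bridge array (2 ^ (Nat.log2 len - 1)) (by omega)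
      simp only [pollingFuel, pollingAltFuel]
      rw [if_neg (by omega : ¬ array.length = 1), if_pos (by omega : 1 < array.length), ← hLeq]
      exact ih (2 ^ (Nat.log2 len - 1)) (by omega) hnpow (pollingLevel array) a b hLlen
        (by omega) (by omega)

-- ===== VERDICT (by name: the statement is the Claim_ definition above) =====
theorem polling_spec : Claim_equal_polling := by
  intro array _ hpre
  unfold Spec_polling polling polling_alt
  exact (fuel_bridge array.length hpre.1 array (array.length + 1) (array.length + 1) rfl
    (by omega) (by omega)).symm ▸ rfl
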